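-- pv_equiv track=rewrite | github.com/MartijnWaterlander/Advent-of-Code | test_day2.py | detect_sequences
-- ===== SOURCE A (Python) =====
-- def detect_sequences(lower: int, higher: int):
--     """
--     Finds numbers in a range that consist of repeating sequences.
--
--     Args:
--         lower (int): Lower bound of the range.
--         higher (int): Upper bound of the range.
--
--     Returns:
--         list: List of numbers containing repeating sequences.
--     """
--     found = []
--     for number in range(lower, higher + 1):
--         s = str(number)
--         length = len(s)
--         for i in range(2, length + 1):
--             if length % i != 0:
--                 continue
--             seq_len = length // i
--             seqs = [s[j*seq_len:(j+1)*seq_len] for j in range(i)]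
--             if seqs and all(x == seqs[0] for x in seqs):
--                 found.append(number)
--                 break
--     return found
-- ===== SOURCE B (Python) =====
-- def detect_sequences(lower: int, higher: int):
--     """Generate the periodic numbers directly (block repeated >= 2 times),
--     keep those in [lower, higher], and return them sorted."""
--     lo = max(lower, 10)
--     found = set()
--     if higher >= lo:
--         num_digits = len(str(higher))
--         for total in range(2, num_digits + 1):
--             for d in range(1, total):
--                 if total % d != 0:
--                     continue
--                 for block in range(10 ** (d - 1), 10 ** d):
--                     num = block
--                     for _ in range(total // d - 1):
--                         num = num * 10 ** d + block
--                     if lo <= num <= higher: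
--                         found.add(num)
--     return sorted(found)
-- ===== Notes on version B (the rewrite author's own statement) =====
-- stated objective: faster
-- what changed: Instead of scanning every number in [lower, higher] and splitting its decimal string into chunks, B generates exactly the periodic numbers (a block of d digits repeated >= 2 times) for each digit-length up to len(str(higher)), keeps those in range in a set, and returns them sorted.
import Mathlib
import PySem

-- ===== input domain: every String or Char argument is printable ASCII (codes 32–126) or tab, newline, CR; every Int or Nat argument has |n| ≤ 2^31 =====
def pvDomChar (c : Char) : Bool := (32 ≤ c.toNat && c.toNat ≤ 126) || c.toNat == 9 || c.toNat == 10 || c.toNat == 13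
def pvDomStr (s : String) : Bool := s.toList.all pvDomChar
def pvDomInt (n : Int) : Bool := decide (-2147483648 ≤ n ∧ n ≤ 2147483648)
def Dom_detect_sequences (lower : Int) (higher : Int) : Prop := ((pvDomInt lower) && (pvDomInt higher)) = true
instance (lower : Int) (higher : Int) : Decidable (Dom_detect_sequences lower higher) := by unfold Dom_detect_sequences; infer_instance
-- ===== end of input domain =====

-- B replaces A's scan of every number in [lower, higher] (splitting each decimal string into
-- chunks) by directly generating the block-repetition numbers up to len(str(higher)) digits,
-- filtering them into a set and sorting — an asymptotically faster algorithm, same output.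

-- ===== PORT A =====
def seqsA (s : String) (length i : Int) : List String :=
  (PySem.List.pyRange 0 i 1).map
    (fun j => PySem.Str.slice s (some (j * PySem.Int.floordiv length i))
      (some ((j + 1) * PySem.Int.floordiv length i)))

def detectLoopA (s : String) (length : Int) : List Int → Bool
  | [] => false
  | i :: rest =>
    if PySem.Int.mod length i ≠ 0 then detectLoopA s length rest
    else
      match seqsA s length i with
      | [] => detectLoopA s length rest
      | s0 :: rest' => if (s0 :: rest').all (fun x => x == s0) then true
        else detectLoopA s length rest

def detect_sequences (lower : Int) (higher : Int) : List Int :=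
  (PySem.List.pyRange lower (higher + 1) 1).foldl
    (fun found number =>
      let s := PySem.Int.toStr number
      let length := PySem.Str.len s
      if detectLoopA s length (PySem.List.pyRange 2 (length + 1) 1) then found ++ [number]
      else found) []


-- ===== PORT B =====
def detect_sequences_alt (lower : Int) (higher : Int) : List Int :=
  let lo := max lower 10
  let found : PySem.Set Int :=
    if lo ≤ higher then
      let numDigits := PySem.Str.len (PySem.Int.toStr higher)
      (PySem.List.pyRange 2 (numDigits + 1) 1).foldl (fun found total =>
        (PySem.List.pyRange 1 total 1).foldl (fun found d =>
          if PySem.Int.mod total d ≠ 0 then found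
          else
            (PySem.List.pyRange (10 ^ (d - 1).toNat) (10 ^ d.toNat) 1).foldl (fun found block =>
              let num := (PySem.List.pyRange 0 (PySem.Int.floordiv total d - 1) 1).foldl
                (fun num _ => num * 10 ^ d.toNat + block) block
              if lo ≤ num ∧ num ≤ higher then PySem.Set.add found num else found) found) found) []
    else []
  PySem.List.sorted found (fun x => x) false

-- ===== PRECONDITION & SPEC =====
def Spec_detect_sequences (lower : Int) (higher : Int) (out : List Int) : Prop := out = detect_sequences_alt lower higher
instance (lower : Int) (higher : Int) (out : List Int) : Decidable (Spec_detect_sequences lower higher out) := by unfold Spec_detect_sequences; infer_instance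

-- ===== CLAIM (what is proved, stated in full; the proofs are below) =====
def Claim_equal_detect_sequences : Prop := ∀ (lower : Int) (higher : Int), Dom_detect_sequences lower higher → Spec_detect_sequences lower higher (detect_sequences lower higher)

-- ===== LEMMAS AND PROOFS =====

theorem tdc_step (f n : Nat) (l : List Char) :
    Nat.toDigitsCore 10 (f+1) n l =
      if n / 10 = 0 then (n % 10).digitChar :: l
      else Nat.toDigitsCore 10 f (n/10) ((n % 10).digitChar :: l) := by
  rw [Nat.toDigitsCore]

theorem tdc_eq : ∀ (n : Nat), ∀ (f : Nat), ∀ (l : List Char), n < f →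
    Nat.toDigitsCore 10 f n l = Nat.toDigitsCore 10 (n+1) n [] ++ l := by
  intro n
  induction n using Nat.strong_induction_on with
  | _ n ih =>
    intro f l hf
    match f, hf with
    | f+1, hf =>
      rw [tdc_step, tdc_step]
      by_cases h0 : n / 10 = 0
      · simp [h0]
      · simp only [h0, if_false]
        have hlt : n / 10 < n := Nat.div_lt_self (by omega) (by omega)
        rw [ih (n/10) hlt f _ (by omega), ih (n/10) hlt n _ (by omega)]
        simp

def D (n : Nat) : List Char := Nat.toDigits 10 n

theorem D_lt {n : Nat} (h : n < 10) : D n = [Nat.digitChar n] := by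
  have h0 : n / 10 = 0 := Nat.div_eq_of_lt h
  have hm : n % 10 = n := Nat.mod_eq_of_lt h
  simp [D, Nat.toDigits, tdc_step, h0, hm]

theorem D_ge {n : Nat} (h : 10 ≤ n) : D n = D (n/10) ++ [Nat.digitChar (n % 10)] := by
  have h0 : ¬ n / 10 = 0 := by
    intro hc
    have : n < 10 := by
      have := Nat.lt_of_div_eq_zero (by omega) hc
      omega
    omega
  simp only [D, Nat.toDigits]
  rw [tdc_step]
  simp only [h0, if_false]
  rw [tdc_eq (n/10) n _ (Nat.div_lt_self (by omega) (by omega))]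

-- digit characters
def dval (c : Char) : Nat := c.toNat - 48

theorem dval_digitChar {k : Nat} (h : k < 10) : dval (Nat.digitChar k) = k := by
  interval_cases k <;> decide

theorem isdig_digitChar {k : Nat} (h : k < 10) : PySem.Chars.isdigit (Nat.digitChar k) = true := by
  interval_cases k <;> decide


theorem char_digit_cases {c : Char} (h : PySem.Chars.isdigit c = true) :
    c = '0' ∨ c = '1' ∨ c = '2' ∨ c = '3' ∨ c = '4' ∨ c = '5' ∨ c = '6' ∨ c = '7' ∨ c = '8' ∨ c = '9' := by
  unfold PySem.Chars.isdigit at h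
  rw [Bool.and_eq_true, decide_eq_true_eq, decide_eq_true_eq, Char.le_def, Char.le_def,
    UInt32.le_iff_toNat_le, UInt32.le_iff_toNat_le] at h
  have h0 : ('0':Char).val.toNat = 48 := by decide
  have h9 : ('9':Char).val.toNat = 57 := by decide
  have hv : c.val.toNat = 48 ∨ c.val.toNat = 49 ∨ c.val.toNat = 50 ∨ c.val.toNat = 51 ∨
      c.val.toNat = 52 ∨ c.val.toNat = 53 ∨ c.val.toNat = 54 ∨ c.val.toNat = 55 ∨
      c.val.toNat = 56 ∨ c.val.toNat = 57 := by omega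
  have key : ∀ d : Char, c.val.toNat = d.val.toNat → c = d :=
    fun d e => Char.ext (UInt32.toNat_inj.mp e)
  rcases hv with hv|hv|hv|hv|hv|hv|hv|hv|hv|hv
  · exact Or.inl (key '0' (by rw [hv]; decide))
  · exact Or.inr (Or.inl (key '1' (by rw [hv]; decide)))
  · exact Or.inr (Or.inr (Or.inl (key '2' (by rw [hv]; decide))))
  · exact Or.inr (Or.inr (Or.inr (Or.inl (key '3' (by rw [hv]; decide)))))
  · exact Or.inr (Or.inr (Or.inr (Or.inr (Or.inl (key '4' (by rw [hv]; decide))))))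
  · exact Or.inr (Or.inr (Or.inr (Or.inr (Or.inr (Or.inl (key '5' (by rw [hv]; decide)))))))
  · exact Or.inr (Or.inr (Or.inr (Or.inr (Or.inr (Or.inr (Or.inl (key '6' (by rw [hv]; decide))))))))
  · exact Or.inr (Or.inr (Or.inr (Or.inr (Or.inr (Or.inr (Or.inr (Or.inl (key '7' (by rw [hv]; decide)))))))))
  · exact Or.inr (Or.inr (Or.inr (Or.inr (Or.inr (Or.inr (Or.inr (Or.inr (Or.inl (key '8' (by rw [hv]; decide))))))))))
  · exact Or.inr (Or.inr (Or.inr (Or.inr (Or.inr (Or.inr (Or.inr (Or.inr (Or.inr (key '9' (by rw [hv]; decide))))))))))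


theorem digitChar_dval {c : Char} (h : PySem.Chars.isdigit c = true) :
    Nat.digitChar (dval c) = c := by
  rcases char_digit_cases h with h|h|h|h|h|h|h|h|h|h <;> subst h <;> decide

theorem dval_lt_ten {c : Char} (h : PySem.Chars.isdigit c = true) : dval c < 10 := by
  rcases char_digit_cases h with h|h|h|h|h|h|h|h|h|h <;> subst h <;> decide
def lval (cs : List Char) : Nat := cs.foldl (fun a c => 10*a + dval c) 0

theorem lval_append_singleton (cs : List Char) (c : Char) :
    lval (cs ++ [c]) = 10 * lval cs + dval c := by
  simp [lval, List.foldl_append]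

theorem lval_D (n : Nat) : lval (D n) = n := by
  induction n using Nat.strong_induction_on with
  | _ n ih =>
    by_cases h : n < 10
    · rw [D_lt h]; simp [lval, dval_digitChar h]
    · rw [D_ge (by omega), lval_append_singleton, ih (n/10) (Nat.div_lt_self (by omega) (by omega)),
        dval_digitChar (Nat.mod_lt _ (by omega))]
      omega

theorem D_ne_nil (n : Nat) : D n ≠ [] := by
  by_cases h : n < 10
  · rw [D_lt h]; simp
  · rw [D_ge (by omega)]; simp

theorem D_digits (n : Nat) : ∀ c ∈ D n, PySem.Chars.isdigit c = true := by
  induction n using Nat.strong_induction_on with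
  | _ n ih =>
    by_cases h : n < 10
    · rw [D_lt h]; intro c hc; simp at hc; subst hc; exact isdig_digitChar h
    · rw [D_ge (by omega)]
      intro c hc
      rcases List.mem_append.mp hc with hc | hc
      · exact ih (n/10) (Nat.div_lt_self (by omega) (by omega)) c hc
      · simp at hc; subst hc; exact isdig_digitChar (Nat.mod_lt _ (by omega))

theorem D_head_pos {n : Nat} (h : 1 ≤ n) : ∀ c, (D n).head? = some c → dval c ≠ 0 := by
  induction n using Nat.strong_induction_on with
  | _ n ih =>
    by_cases hlt : n < 10
    · rw [D_lt hlt]; intro c hc; simp at hc; subst hc; rw [dval_digitChar hlt]; omega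
    · rw [D_ge (by omega)]
      intro c hc
      rw [List.head?_append] at hc
      rcases Option.or_eq_some_iff.mp hc with hc | hc
      · exact ih (n/10) (Nat.div_lt_self (by omega) (by omega)) (by
          have := Nat.div_pos (by omega : 10 ≤ n) (by omega); omega) c hc
      · exact absurd hc.1 (by simp [List.head?_eq_none_iff, D_ne_nil])

theorem D_len_bounds {n : Nat} (h : 1 ≤ n) :
    10 ^ ((D n).length - 1) ≤ n ∧ n < 10 ^ (D n).length := by
  induction n using Nat.strong_induction_on with
  | _ n ih =>
    by_cases hlt : n < 10
    · rw [D_lt hlt]; simpa using ⟨by omega, by omega⟩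
    · rw [D_ge (by omega)]
      have hq : 1 ≤ n / 10 := Nat.div_pos (by omega) (by omega)
      obtain ⟨h1, h2⟩ := ih (n/10) (Nat.div_lt_self (by omega) (by omega)) hq
      have hL : 1 ≤ (D (n/10)).length := List.length_pos_iff.mpr (D_ne_nil _)
      constructor
      · simp only [List.length_append, List.length_cons, List.length_nil]
        have : 10 ^ ((D (n/10)).length + 1 - 1) = 10 ^ ((D (n/10)).length - 1) * 10 := by
          rw [← pow_succ]; congr 1; omega
        rw [this]
        have := Nat.div_add_mod n 10
        calc 10 ^ ((D (n/10)).length - 1) * 10 ≤ (n/10) * 10 := by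
              exact Nat.mul_le_mul_right _ h1
          _ ≤ n := by omega
      · simp only [List.length_append, List.length_cons, List.length_nil]
        rw [pow_succ]
        have := Nat.div_add_mod n 10
        have hm : n % 10 < 10 := Nat.mod_lt _ (by omega)
        calc n < (n/10 + 1) * 10 := by omega
          _ ≤ 10 ^ (D (n/10)).length * 10 := by
              exact Nat.mul_le_mul_right _ (by omega)

theorem D_len_of_bounds {b d : Nat} (hd : 1 ≤ d) (h1 : 10^(d-1) ≤ b) (h2 : b < 10^d) :
    (D b).length = d := by
  have hb1 : 1 ≤ b := le_trans (Nat.one_le_pow _ _ (by omega)) h1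
  obtain ⟨l1, l2⟩ := D_len_bounds hb1
  set L := (D b).length with hL
  have hLpos : 1 ≤ L := List.length_pos_iff.mpr (D_ne_nil _)
  by_contra hne
  rcases Nat.lt_or_ge L d with hlt | hge
  · have : 10 ^ L ≤ 10 ^ (d-1) := Nat.pow_le_pow_right (by omega) (by omega)
    omega
  · have : 10 ^ d ≤ 10 ^ (L-1) := Nat.pow_le_pow_right (by omega) (by omega)
    omega

theorem D_append {a b d : Nat} (ha : 1 ≤ a) (hd : 1 ≤ d) (h1 : 10^(d-1) ≤ b) (h2 : b < 10^d) :
    D (a * 10^d + b) = D a ++ D b := by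
  induction d generalizing b with
  | zero => omega
  | succ k ihk =>
    rcases Nat.eq_zero_or_pos k with hk | hk
    · subst hk
      have hb10 : b < 10 := by simpa using h2
      have hge : 10 ≤ a * 10^1 + b := by nlinarith
      rw [D_ge hge]
      have hdiv : (a * 10^1 + b) / 10 = a := by omega
      have hmod : (a * 10^1 + b) % 10 = b := by omega
      rw [hdiv, hmod, D_lt hb10]
    · have hb10 : 10 ≤ b := by
        calc 10 = 10 ^ 1 := by norm_num
          _ ≤ 10 ^ (k+1-1) := Nat.pow_le_pow_right (by omega) (by omega)
          _ ≤ b := h1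
      set b' := b / 10 with hb'
      set v := b % 10 with hv
      have hkey : a * 10^(k+1) + b = 10 * (a * 10^k + b') + v := by
        have := Nat.div_add_mod b 10
        ring_nf
        omega
      have hge : 10 ≤ a * 10^(k+1) + b := by nlinarith
      rw [D_ge hge]
      have hdiv : (a * 10^(k+1) + b) / 10 = a * 10^k + b' := by omega
      have hmod : (a * 10^(k+1) + b) % 10 = v := by omega
      rw [hdiv, hmod]
      have hb'1 : 10^(k-1) ≤ b' := by
        rw [hb', Nat.le_div_iff_mul_le (by omega)]
        calc 10^(k-1) * 10 = 10^k := by rw [← pow_succ]; congr 1; omega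
          _ = 10^(k+1-1) := by congr 1
          _ ≤ b := h1
      have hb'2 : b' < 10^k := by
        rw [hb', Nat.div_lt_iff_lt_mul (by omega)]
        calc b < 10^(k+1) := h2
          _ = 10^k * 10 := by rw [pow_succ]
      rw [ihk hk hb'1 hb'2, D_ge hb10, ← hb', ← hv]
      simp

def repN (block d : Nat) : Nat → Nat
  | 0 => block
  | r+1 => repN block d r * 10^d + block

theorem repN_ge (block d r : Nat) : block ≤ repN block d r := by
  induction r with
  | zero => simp [repN]
  | succ r ih => simp [repN]

theorem D_repN {block d : Nat} (hd : 1 ≤ d) (h1 : 10^(d-1) ≤ block) (h2 : block < 10^d) (r : Nat) :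
    D (repN block d r) = (List.replicate (r+1) (D block)).flatten := by
  induction r with
  | zero => simp [repN]
  | succ r ih =>
    have hpos : 1 ≤ repN block d r := by
      have := repN_ge block d r
      have : 1 ≤ block := le_trans (Nat.one_le_pow _ _ (by omega)) h1
      omega
    rw [show repN block d (r+1) = repN block d r * 10^d + block from rfl,
      D_append hpos hd h1 h2, ih, List.replicate_succ' (n := r+1), List.flatten_append]
    simp
theorem foldl_lval_ge : ∀ (rest : List Char) (a : Nat), 1 ≤ a →
    1 ≤ rest.foldl (fun a c => 10*a + dval c) a := by
  intro rest
  induction rest with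
  | nil => intro a ha; simpa using ha
  | cons c t ih => intro a ha; simp only [List.foldl_cons]; exact ih _ (by omega)

theorem lval_pos (cs : List Char) (h1 : cs ≠ [])
    (h2 : ∀ c, cs.head? = some c → dval c ≠ 0) : 1 ≤ lval cs := by
  cases cs with
  | nil => exact absurd rfl h1
  | cons c t =>
    have := h2 c rfl
    unfold lval
    simp only [List.foldl_cons]
    exact foldl_lval_ge t _ (by omega)

theorem D_lval : ∀ (cs : List Char), cs ≠ [] → (∀ c ∈ cs, PySem.Chars.isdigit c = true) →
    (∀ c, cs.head? = some c → dval c ≠ 0) → D (lval cs) = cs := by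
  intro cs
  induction cs using List.reverseRecOn with
  | nil => intro h; exact absurd rfl h
  | append_singleton cs c ih =>
    intro _ hdig hhead
    have hdigc : PySem.Chars.isdigit c = true := hdig c (by simp)
    have hdc : dval c < 10 := dval_lt_ten hdigc
    by_cases hcs : cs = []
    · subst hcs
      simp only [List.nil_append]
      have : lval [c] = dval c := by simp [lval]
      rw [this, D_lt hdc, digitChar_dval hdigc]
    · obtain ⟨c0, t, rfl⟩ := List.exists_cons_of_ne_nil hcs
      have hh' : ∀ x, (c0 :: t).head? = some x → dval x ≠ 0 := by
        intro x hx
        have hx' : x = c0 := by simpa using hx.symm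
        subst hx'
        exact hhead x (by simp)
      have hpos := lval_pos (c0 :: t) (by simp) hh'
      rw [lval_append_singleton]
      have h10 : 10 ≤ 10 * lval (c0 :: t) + dval c := by omega
      rw [D_ge h10]
      have hdiv : (10 * lval (c0 :: t) + dval c) / 10 = lval (c0 :: t) := by omega
      have hmod : (10 * lval (c0 :: t) + dval c) % 10 = dval c := by omega
      rw [hdiv, hmod,
        ih (by simp) (fun x hx => hdig x (by
          rcases List.mem_cons.mp hx with h | h
          · simp [h]
          · exact List.mem_cons_of_mem _ (List.mem_append_left _ h))) hh',
        digitChar_dval hdigc]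

theorem D_inj {a b : Nat} (h : D a = D b) : a = b := by
  have ha := lval_D a
  rw [h, lval_D] at ha
  omega

theorem drop_flatten_replicate {α : Type} (t : List α) : ∀ (j i : Nat), j ≤ i →
    ((List.replicate i t).flatten).drop (j * t.length) = (List.replicate (i - j) t).flatten := by
  intro j
  induction j with
  | zero => simp
  | succ j ih =>
    intro i hj
    match i, hj with
    | i+1, hj =>
      rw [List.replicate_succ, List.flatten_cons,
        show (j+1) * t.length = t.length + j * t.length by ring,
        ← List.drop_drop, List.drop_left]
      rw [ih i (by omega), show i + 1 - (j + 1) = i - j by omega]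

theorem take_flatten_replicate {α : Type} (t : List α) (i : Nat) (hi : 1 ≤ i) :
    ((List.replicate i t).flatten).take t.length = t := by
  match i, hi with
  | i+1, _ => rw [List.replicate_succ, List.flatten_cons, List.take_left]

theorem chunk_of_flatten {α : Type} (t : List α) (i j : Nat) (hj : j < i) :
    (((List.replicate i t).flatten).drop (j * t.length)).take t.length = t := by
  rw [drop_flatten_replicate t j i (by omega), take_flatten_replicate t (i - j) (by omega)]

theorem chunks_to_rep {α : Type} : ∀ (i : Nat) (cs : List α) (sl : Nat), cs.length = i * sl →
    (∀ j, j < i → (cs.drop (j*sl)).take sl = cs.take sl) →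
    cs = (List.replicate i (cs.take sl)).flatten := by
  intro i
  induction i with
  | zero =>
    intro cs sl hlen _
    simp only [List.replicate_zero, List.flatten_nil]
    exact List.eq_nil_of_length_eq_zero (by omega)
  | succ i ih =>
    intro cs sl hlen hch
    rcases Nat.eq_zero_or_pos i with hi | hi
    · subst hi
      simp only [List.replicate_succ, List.replicate_zero, List.flatten_cons, List.flatten_nil,
        List.append_nil]
      rw [List.take_of_length_le (by omega)]
    · have htake : (cs.drop sl).take sl = cs.take sl := by
        have := hch 1 (by omega)
        simpa using this
      have hlen' : (cs.drop sl).length = i * sl := by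
        have hexp : (i+1) * sl = i * sl + sl := by ring
        simp only [List.length_drop]
        omega
      have hch' : ∀ j, j < i → ((cs.drop sl).drop (j*sl)).take sl = (cs.drop sl).take sl := by
        intro j hj
        rw [htake, List.drop_drop, show sl + j*sl = (j+1)*sl by ring]
        exact hch (j+1) (by omega)
      have hrec := ih (cs.drop sl) sl hlen' hch'
      calc cs = cs.take sl ++ cs.drop sl := (List.take_append_drop sl cs).symm
        _ = cs.take sl ++ (List.replicate i ((cs.drop sl).take sl)).flatten := by rw [← hrec]
        _ = (List.replicate (i+1) (cs.take sl)).flatten := by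
            rw [htake, List.replicate_succ, List.flatten_cons]
-- ===== A-side reduction =====
theorem detectLoopA_iff (s : String) (L : Int) : ∀ (l : List Int),
    (detectLoopA s L l = true ↔ ∃ i ∈ l, PySem.Int.mod L i = 0 ∧
      ∃ s0 rest, seqsA s L i = s0 :: rest ∧ ∀ x ∈ seqsA s L i, x = s0) := by
  intro l
  induction l with
  | nil => simp [detectLoopA]
  | cons i rest ih =>
    simp only [detectLoopA]
    by_cases hmod : PySem.Int.mod L i ≠ 0
    · rw [if_pos hmod, ih]
      constructor
      · rintro ⟨i', hi', h⟩; exact ⟨i', List.mem_cons_of_mem _ hi', h⟩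
      · rintro ⟨i', hi', h⟩
        rcases List.mem_cons.mp hi' with rfl | hi'
        · exact absurd h.1 hmod
        · exact ⟨i', hi', h⟩
    · rw [if_neg hmod]
      rw [not_not] at hmod
      rcases hseq : seqsA s L i with _ | ⟨s0, rest'⟩
      · dsimp only
        rw [ih]
        constructor
        · rintro ⟨i', hi', h⟩; exact ⟨i', List.mem_cons_of_mem _ hi', h⟩
        · rintro ⟨i', hi', h⟩
          rcases List.mem_cons.mp hi' with rfl | hi'
          · obtain ⟨s0, r0, he, _⟩ := h.2
            rw [hseq] at he; cases he
          · exact ⟨i', hi', h⟩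
      · dsimp only
        by_cases hall : (s0 :: rest').all (fun x => x == s0) = true
        · rw [if_pos hall]
          constructor
          · intro _
            refine ⟨i, List.mem_cons_self, hmod, s0, rest', hseq, ?_⟩
            intro x hx
            rw [hseq] at hx
            exact eq_of_beq (List.all_eq_true.mp hall x hx)
          · intro _; rfl
        · rw [if_neg hall, ih]
          constructor
          · rintro ⟨i', hi', h⟩; exact ⟨i', List.mem_cons_of_mem _ hi', h⟩
          · rintro ⟨i', hi', h⟩
            rcases List.mem_cons.mp hi' with rfl | hi'
            · obtain ⟨t0, r0, he, hx⟩ := h.2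
              rw [hseq] at he
              obtain ⟨rfl, rfl⟩ : t0 = s0 ∧ r0 = rest' := by
                constructor <;> [exact (List.cons.injEq .. ▸ he).1.symm ▸ rfl; skip]
                exact (List.cons_eq_cons.mp he).2.symm ▸ rfl
              exact absurd (List.all_eq_true.mpr (fun x hx' => beq_iff_eq.mpr
                (hx x (hseq ▸ hx')))) hall
            · exact ⟨i', hi', h⟩

def pA (number : Int) : Bool :=
  detectLoopA (PySem.Int.toStr number) (PySem.Str.len (PySem.Int.toStr number))
    (PySem.List.pyRange 2 (PySem.Str.len (PySem.Int.toStr number) + 1) 1)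

theorem A_eq_filter (lower higher : Int) :
    detect_sequences lower higher = (PySem.List.pyRange lower (higher+1) 1).filter pA := by
  unfold detect_sequences
  rw [show (fun (found : List Int) (number : Int) =>
      let s := PySem.Int.toStr number
      let length := PySem.Str.len s
      if detectLoopA s length (PySem.List.pyRange 2 (length + 1) 1) then found ++ [number]
      else found) = (fun found number => if pA number then found ++ [number] else found) from rfl]
  rw [PySem.List.foldl_append_if_eq_filter]
  simp
-- ===== bridging toChars and D =====
theorem toChars_nonneg {n : Int} (h : 0 ≤ n) : PySem.Int.toChars n = D n.toNat := by
  unfold PySem.Int.toChars D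
  rw [if_neg (by omega)]

theorem toChars_neg {n : Int} (h : n < 0) : PySem.Int.toChars n = '-' :: D n.natAbs := by
  unfold PySem.Int.toChars D
  rw [if_pos h]

theorem lenA_eq (n : Int) : PySem.Str.len (PySem.Int.toStr n) = ((PySem.Int.toChars n).length : Int) := by
  rw [PySem.Str.len_eq, PySem.Int.toList_toStr]

theorem seqsA_eq (n : Int) (iN : Nat) :
    seqsA (PySem.Int.toStr n) (((PySem.Int.toChars n).length : Nat) : Int) (iN : Int) =
      (List.range iN).map (fun j => String.ofList
        (((PySem.Int.toChars n).drop (j * ((PySem.Int.toChars n).length / iN))).take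
          ((PySem.Int.toChars n).length / iN))) := by
  unfold seqsA
  rw [PySem.List.pyRange_zero_nat, List.map_map]
  apply List.map_congr_left
  intro j _
  simp only [Function.comp_apply]
  rw [PySem.Int.floordiv_natCast]
  have h1 : (j : Int) * (((PySem.Int.toChars n).length / iN : Nat) : Int)
      = ((j * ((PySem.Int.toChars n).length / iN) : Nat) : Int) := by push_cast; ring
  have h2 : ((j : Int) + 1) * (((PySem.Int.toChars n).length / iN : Nat) : Int)
      = ((j * ((PySem.Int.toChars n).length / iN) : Nat) : Int)
        + (((PySem.Int.toChars n).length / iN : Nat) : Int) := by push_cast; ring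
  rw [h1, h2]
  unfold PySem.Str.slice
  congr 1
  rw [PySem.Chars.slice_eq_listSlice, PySem.Int.toList_toStr, PySem.List.slice_natCast_add]

-- all slices equal (plus divisibility) force the replicated-block shape
theorem condA_to_rep {n : Int} {iN : Nat} (h2 : 2 ≤ iN)
    (hdvd : iN ∣ (PySem.Int.toChars n).length)
    (hcond : ∃ s0 rest, seqsA (PySem.Int.toStr n) (((PySem.Int.toChars n).length : Nat) : Int) (iN : Int) = s0 :: rest ∧
      ∀ x ∈ seqsA (PySem.Int.toStr n) (((PySem.Int.toChars n).length : Nat) : Int) (iN : Int), x = s0) :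
    PySem.Int.toChars n =
      (List.replicate iN ((PySem.Int.toChars n).take ((PySem.Int.toChars n).length / iN))).flatten := by
  obtain ⟨s0, rest, hcons, hall⟩ := hcond
  set cs := PySem.Int.toChars n with hcs
  set slN := cs.length / iN with hsl
  have hlen : cs.length = iN * slN := (Nat.div_mul_cancel hdvd).symm.trans (Nat.mul_comm _ _)
  -- s0 is the j = 0 slice
  have hs0 : s0 = String.ofList (cs.take slN) := by
    have h0 : (List.range iN).map (fun j => String.ofList ((cs.drop (j * slN)).take slN))
        = s0 :: rest := by rw [← seqsA_eq, hcons]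
    have : iN ≠ 0 := by omega
    rcases hr : List.range iN with _ | ⟨k, tl⟩
    · exact absurd (List.range_eq_nil.mp hr) this
    · have hk : k = 0 := by
        have h0' : (List.range iN)[0]? = some 0 := by
          rw [List.getElem?_range (by omega)]
        rw [hr] at h0'
        have : (0:Nat) = k := by simpa using h0'.symm
        omega
      rw [hr, List.map_cons, hk] at h0
      have := (List.cons_eq_cons.mp h0).1
      simp at this
      rw [← this]
  -- every slice equals the first
  have hch : ∀ j, j < iN → (cs.drop (j * slN)).take slN = cs.take slN := by
    intro j hj
    have hmem : String.ofList ((cs.drop (j * slN)).take slN) ∈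
        seqsA (PySem.Int.toStr n) ((cs.length : Nat) : Int) (iN : Int) := by
      rw [seqsA_eq]
      exact List.mem_map.mpr ⟨j, List.mem_range.mpr hj, rfl⟩
    have := hall _ hmem
    rw [hs0] at this
    exact String.ofList_inj.mp this
  exact chunks_to_rep iN cs slN hlen hch

-- and conversely the replicated shape makes all slices equal
theorem rep_to_condA {n : Int} {iN slN : Nat} (h2 : 2 ≤ iN) (_hsl : 1 ≤ slN)
    (hlen : (PySem.Int.toChars n).length = iN * slN)
    (hrep : PySem.Int.toChars n =
      (List.replicate iN ((PySem.Int.toChars n).take slN)).flatten) :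
    ∃ s0 rest, seqsA (PySem.Int.toStr n) (((PySem.Int.toChars n).length : Nat) : Int) (iN : Int) = s0 :: rest ∧
      ∀ x ∈ seqsA (PySem.Int.toStr n) (((PySem.Int.toChars n).length : Nat) : Int) (iN : Int), x = s0 := by
  set cs := PySem.Int.toChars n with hcs
  have hslN : cs.length / iN = slN := by
    rw [hlen, Nat.mul_div_cancel_left _ (by omega)]
  have hle : slN ≤ cs.length := by
    rw [hlen]
    calc slN = 1 * slN := (one_mul _).symm
      _ ≤ iN * slN := Nat.mul_le_mul_right _ (by omega)
  have htlen : (cs.take slN).length = slN := by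
    rw [List.length_take]
    omega
  have hchunk : ∀ j, j < iN → (cs.drop (j * slN)).take slN = cs.take slN := by
    intro j hj
    have h := chunk_of_flatten (cs.take slN) iN j hj
    rw [htlen] at h
    conv_lhs => rw [hrep]
    exact h
  have hconst : ∀ x ∈ seqsA (PySem.Int.toStr n) ((cs.length : Nat) : Int) (iN : Int),
      x = String.ofList (cs.take slN) := by
    intro x hx
    rw [seqsA_eq] at hx
    obtain ⟨j, hjmem, rfl⟩ := List.mem_map.mp hx
    rw [hslN, hchunk j (List.mem_range.mp hjmem)]
  have hne : seqsA (PySem.Int.toStr n) ((cs.length : Nat) : Int) (iN : Int) ≠ [] := by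
    rw [seqsA_eq]
    simp only [ne_eq, List.map_eq_nil_iff, List.range_eq_nil]
    omega
  rcases hq : seqsA (PySem.Int.toStr n) ((cs.length : Nat) : Int) (iN : Int) with _ | ⟨s0', tl⟩
  · exact absurd hq hne
  · exact ⟨s0', tl, rfl, fun x hx => (hconst x (hq ▸ hx)).trans
      (hconst s0' (hq ▸ List.mem_cons_self)).symm⟩
def PerN (n : Int) : Prop := ∃ d r block : Nat, 1 ≤ d ∧ 2 ≤ r ∧
  10^(d-1) ≤ block ∧ block < 10^d ∧ n = ((repN block d (r-1) : Nat) : Int)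

theorem repN_len {d r block : Nat} (hd : 1 ≤ d) (hr : 1 ≤ r)
    (hb1 : 10^(d-1) ≤ block) (hb2 : block < 10^d) :
    (D (repN block d (r-1))).length = d * r := by
  rw [D_repN hd hb1 hb2, show r - 1 + 1 = r by omega]
  have hdb := D_len_of_bounds hd hb1 hb2
  simp [List.length_flatten, List.map_replicate, List.sum_replicate, smul_eq_mul, hdb]
  ring

theorem perN_ge10 {n : Int} (h : PerN n) : 10 ≤ n := by
  obtain ⟨d, r, block, hd, hr, hb1, hb2, rfl⟩ := h
  have hbpos : 1 ≤ block := le_trans (Nat.one_le_pow _ _ (by omega)) hb1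
  have hpos : 1 ≤ repN block d (r-1) := le_trans hbpos (repN_ge _ _ _)
  have hlen := repN_len hd (by omega : 1 ≤ r) hb1 hb2
  obtain ⟨hlow, _⟩ := D_len_bounds hpos
  rw [hlen] at hlow
  have h2 : 2 ≤ d * r := by nlinarith
  have h10 : 10 ≤ repN block d (r-1) := by
    calc 10 = 10^1 := (pow_one 10).symm
      _ ≤ 10^(d*r-1) := Nat.pow_le_pow_right (by omega) (by omega)
      _ ≤ _ := hlow
  exact_mod_cast h10

theorem pA_false_small {n : Int} (h0 : 0 ≤ n) (h9 : n < 10) : pA n = false := by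
  unfold pA
  rw [lenA_eq, toChars_nonneg h0, D_lt (by omega : n.toNat < 10)]
  rw [show ((([Nat.digitChar n.toNat].length : Nat) : Int) + 1) = 2 by norm_num]
  rw [PySem.List.pyRange_one_eq_nil (by norm_num)]
  rfl

theorem pA_false_neg {n : Int} (h : n < 0) : pA n = false := by
  by_contra hb
  rw [Bool.not_eq_false] at hb
  unfold pA at hb
  rw [lenA_eq, detectLoopA_iff] at hb
  obtain ⟨i, hmem, hmod, hcond⟩ := hb
  obtain ⟨hi2, hiL⟩ := PySem.List.mem_pyRange_one.mp hmem
  set cs := PySem.Int.toChars n with hcsdef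
  set iN := i.toNat with hiN
  have hi : i = (iN : Int) := by omega
  have hiN2 : 2 ≤ iN := by omega
  have hiNL : iN ≤ cs.length := by omega
  rw [hi] at hmod hcond
  have hdvd : iN ∣ cs.length := by
    rw [PySem.Int.mod_natCast] at hmod
    exact Nat.dvd_of_mod_eq_zero (by exact_mod_cast hmod)
  have hrep := condA_to_rep hiN2 hdvd hcond
  set slN := cs.length / iN with hslN
  have hlen : cs.length = iN * slN := (Nat.div_mul_cancel hdvd).symm.trans (Nat.mul_comm _ _)
  have hcs' : cs = '-' :: D n.natAbs := toChars_neg h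
  have hlpos : 1 ≤ cs.length := by rw [hcs']; simp
  have hsl1 : 1 ≤ slN := by
    rcases Nat.eq_zero_or_pos slN with h0 | h0
    · rw [h0, Nat.mul_zero] at hlen; omega
    · exact h0
  have hle : slN ≤ cs.length := by
    rw [hlen]
    calc slN = 1 * slN := (one_mul _).symm
      _ ≤ iN * slN := Nat.mul_le_mul_right _ (by omega)
  have htlen : (cs.take slN).length = slN := by rw [List.length_take]; omega
  have hchunk := chunk_of_flatten (cs.take slN) iN 1 (by omega)
  rw [htlen, one_mul, ← hrep] at hchunk
  have hslen : slN < cs.length := by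
    have : 2 * slN ≤ iN * slN := Nat.mul_le_mul_right _ hiN2
    omega
  have e1 : ((cs.drop slN).take slN)[0]? = cs[slN]? := by
    rw [List.getElem?_take_of_lt (by omega), List.getElem?_drop]
    simp
  have e2 : (cs.take slN)[0]? = cs[0]? := List.getElem?_take_of_lt (by omega)
  have e3 : cs[slN]? = cs[0]? := by rw [← e1, hchunk, e2]
  have h0' : cs[0]? = some '-' := by rw [hcs']; rfl
  have h4 : cs[slN]? = (D n.natAbs)[slN - 1]? := by
    rw [hcs', show slN = (slN - 1) + 1 by omega]
    rfl
  have h5 : (D n.natAbs)[slN - 1]? = some '-' := by rw [← h4, e3, h0']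
  have hmm : '-' ∈ D n.natAbs := List.mem_of_getElem? h5
  exact absurd (D_digits _ '-' hmm) (by decide)

theorem pA_true_iff {n : Int} (h10 : 10 ≤ n) : pA n = true ↔ PerN n := by
  have h0 : 0 ≤ n := by omega
  have hcsD : PySem.Int.toChars n = D n.toNat := toChars_nonneg h0
  have hn1 : 1 ≤ n.toNat := by omega
  constructor
  · intro hb
    unfold pA at hb
    rw [lenA_eq, detectLoopA_iff] at hb
    obtain ⟨i, hmem, hmod, hcond⟩ := hb
    obtain ⟨hi2, hiL⟩ := PySem.List.mem_pyRange_one.mp hmem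
    set cs := PySem.Int.toChars n with hcsdef
    set iN := i.toNat with hiN
    have hi : i = (iN : Int) := by omega
    have hiN2 : 2 ≤ iN := by omega
    rw [hi] at hmod hcond
    have hdvd : iN ∣ cs.length := by
      rw [PySem.Int.mod_natCast] at hmod
      exact Nat.dvd_of_mod_eq_zero (by exact_mod_cast hmod)
    have hrep := condA_to_rep hiN2 hdvd hcond
    set slN := cs.length / iN with hslN
    have hlen : cs.length = iN * slN := (Nat.div_mul_cancel hdvd).symm.trans (Nat.mul_comm _ _)
    have hlpos : 1 ≤ cs.length := by
      rw [hcsdef, toChars_nonneg h0]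
      exact List.length_pos_iff.mpr (D_ne_nil _)
    have hsl1 : 1 ≤ slN := by
      rcases Nat.eq_zero_or_pos slN with hz | hz
      · rw [hz, Nat.mul_zero] at hlen; omega
      · exact hz
    have hle : slN ≤ cs.length := by
      rw [hlen]
      calc slN = 1 * slN := (one_mul _).symm
        _ ≤ iN * slN := Nat.mul_le_mul_right _ (by omega)
    have htlen : (cs.take slN).length = slN := by rw [List.length_take]; omega
    have hdig : ∀ c ∈ cs.take slN, PySem.Chars.isdigit c = true := by
      intro c hc
      have hc' : c ∈ cs := List.take_subset _ _ hc
      rw [hcsdef, toChars_nonneg h0] at hc'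
      exact D_digits n.toNat c hc'
    have hchne : cs.take slN ≠ [] := by
      intro hcne
      rw [hcne] at htlen
      simp at htlen
      omega
    have hhead : ∀ c, (cs.take slN).head? = some c → dval c ≠ 0 := by
      intro c hc
      rw [List.head?_eq_getElem?, List.getElem?_take_of_lt (by omega),
        ← List.head?_eq_getElem?] at hc
      rw [hcsdef, toChars_nonneg h0] at hc
      exact D_head_pos hn1 c hc
    have hDb : D (lval (cs.take slN)) = cs.take slN := D_lval _ hchne hdig hhead
    set blockN := lval (cs.take slN) with hbl
    have hbpos : 1 ≤ blockN := lval_pos _ hchne hhead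
    have hblen : (D blockN).length = slN := by rw [hDb]; exact htlen
    obtain ⟨hb1, hb2⟩ := D_len_bounds hbpos
    rw [hblen] at hb1 hb2
    have hDrep : D (repN blockN slN (iN - 1)) = cs := by
      rw [D_repN hsl1 hb1 hb2, show iN - 1 + 1 = iN by omega, hDb]
      exact hrep.symm
    have hnN : n.toNat = repN blockN slN (iN - 1) := by
      apply D_inj
      rw [hDrep, hcsdef, toChars_nonneg h0]
    refine ⟨slN, iN, blockN, hsl1, hiN2, hb1, hb2, ?_⟩
    rw [← hnN]
    omega
  · rintro ⟨d, r, block, hd, hr, hb1, hb2, hn⟩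
    set nN := repN block d (r-1) with hnN
    have hntn : n.toNat = nN := by omega
    have hdb : (D block).length = d := D_len_of_bounds hd hb1 hb2
    have hDrep : D nN = (List.replicate r (D block)).flatten := by
      rw [hnN, D_repN hd hb1 hb2, show r - 1 + 1 = r by omega]
    have hlen : (PySem.Int.toChars n).length = r * d := by
      rw [hcsD, hntn, hDrep]
      simp [List.length_flatten, List.map_replicate, List.sum_replicate, smul_eq_mul, hdb]
    have htake : (PySem.Int.toChars n).take d = D block := by
      rw [hcsD, hntn, hDrep]
      have := take_flatten_replicate (D block) r (by omega)
      rwa [hdb] at this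
    unfold pA
    rw [lenA_eq, detectLoopA_iff]
    refine ⟨(r : Int), ?_, ?_, ?_⟩
    · rw [PySem.List.mem_pyRange_one]
      have ha : r ≤ r * d := Nat.le_mul_of_pos_right _ (by omega)
      have hb : (r : Int) ≤ ((PySem.Int.toChars n).length : Int) := by
        rw [hlen]; exact_mod_cast ha
      constructor
      · exact_mod_cast hr
      · omega
    · rw [PySem.Int.mod_natCast]
      norm_cast
      simp [hlen, Nat.mul_mod_right]
    · apply rep_to_condA (by omega) hd
      · exact hlen
      · rw [htake, hcsD, hntn]
        exact hDrep
theorem pA_iff (n : Int) : pA n = true ↔ PerN n := by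
  by_cases hneg : n < 0
  · rw [pA_false_neg hneg]
    simp only [Bool.false_eq_true, false_iff]
    intro h
    exact absurd (perN_ge10 h) (by omega)
  · by_cases hsm : n < 10
    · rw [pA_false_small (by omega) hsm]
      simp only [Bool.false_eq_true, false_iff]
      intro h
      exact absurd (perN_ge10 h) (by omega)
    · exact pA_true_iff (by omega)

-- generic membership / nodup through a fold that only adds elements
theorem mem_foldl_step {β : Type} (P : β → Int → Prop) :
    ∀ (l : List β) (f : PySem.Set Int → β → PySem.Set Int) (s : PySem.Set Int),
    (∀ s b, b ∈ l → ∀ y, (y ∈ f s b ↔ y ∈ s ∨ P b y)) →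
    ∀ y, (y ∈ l.foldl f s ↔ y ∈ s ∨ ∃ b ∈ l, P b y) := by
  intro l
  induction l with
  | nil => intro f s _ y; simp
  | cons b t ih =>
    intro f s h y
    rw [List.foldl_cons, ih f _ (fun s b hb y => h s b (List.mem_cons_of_mem _ hb) y),
      h s b List.mem_cons_self]
    simp only [List.mem_cons]
    constructor
    · rintro ((hy | hp) | ⟨b', hb', hp⟩)
      · exact Or.inl hy
      · exact Or.inr ⟨b, Or.inl rfl, hp⟩
      · exact Or.inr ⟨b', Or.inr hb', hp⟩
    · rintro (hy | ⟨b', (rfl | hb'), hp⟩)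
      · exact Or.inl (Or.inl hy)
      · exact Or.inl (Or.inr hp)
      · exact Or.inr ⟨b', hb', hp⟩

theorem nodup_foldl_step {β : Type} :
    ∀ (l : List β) (f : PySem.Set Int → β → PySem.Set Int) (s : PySem.Set Int),
    (∀ s b, List.Nodup s → List.Nodup (f s b)) → List.Nodup s → List.Nodup (l.foldl f s) := by
  intro l
  induction l with
  | nil => intro f s _ hs; simpa using hs
  | cons b t ih =>
    intro f s h hs
    rw [List.foldl_cons]
    exact ih f _ h (h s b hs)

def numOf (total d block : Int) : Int :=
  (PySem.List.pyRange 0 (PySem.Int.floordiv total d - 1) 1).foldl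
    (fun num _ => num * 10 ^ d.toNat + block) block

theorem numFold_eq (bN dN : Nat) : ∀ (m : Nat),
    (PySem.List.pyRange 0 (m : Int) 1).foldl (fun num _ => num * 10^dN + (bN:Int)) (bN:Int)
      = ((repN bN dN m : Nat) : Int) := by
  intro m
  induction m with
  | zero =>
    rw [show ((0:Nat):Int) = 0 from rfl, PySem.List.pyRange_one_eq_nil (by omega)]
    simp [repN]
  | succ m ih =>
    rw [show ((m+1 : Nat) : Int) = (m : Int) + 1 by push_cast; ring,
      PySem.List.pyRange_one_succ_right (by exact_mod_cast Nat.zero_le m), List.foldl_append, ih]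
    simp only [List.foldl_cons, List.foldl_nil]
    rw [show repN bN dN (m+1) = repN bN dN m * 10^dN + bN from rfl]
    push_cast
    ring

theorem numOf_eq (tN dN bN : Nat) (h : 1 ≤ tN / dN) :
    numOf (tN:Int) (dN:Int) (bN:Int) = ((repN bN dN (tN/dN - 1) : Nat) : Int) := by
  unfold numOf
  rw [PySem.Int.floordiv_natCast, Int.toNat_natCast,
    show ((tN/dN : Nat) : Int) - 1 = ((tN/dN - 1 : Nat) : Int) by omega]
  exact numFold_eq bN dN (tN/dN - 1)

theorem D_len_mono {a b : Nat} (ha : 1 ≤ a) (hab : a ≤ b) : (D a).length ≤ (D b).length := by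
  obtain ⟨ha1, ha2⟩ := D_len_bounds ha
  obtain ⟨hb1, hb2⟩ := D_len_bounds (le_trans ha hab)
  by_contra hlt
  have : 10 ^ (D b).length ≤ 10 ^ ((D a).length - 1) := Nat.pow_le_pow_right (by omega) (by omega)
  omega

def bFound (lower higher : Int) : PySem.Set Int :=
  if max lower 10 ≤ higher then
    (PySem.List.pyRange 2 (PySem.Str.len (PySem.Int.toStr higher) + 1) 1).foldl (fun found total =>
      (PySem.List.pyRange 1 total 1).foldl (fun found d =>
        if PySem.Int.mod total d ≠ 0 then found
        else (PySem.List.pyRange (10 ^ (d - 1).toNat) (10 ^ d.toNat) 1).foldl (fun found block =>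
          if max lower 10 ≤ numOf total d block ∧ numOf total d block ≤ higher
          then PySem.Set.add found (numOf total d block) else found) found) found) []
  else []

theorem B_unfold (lower higher : Int) :
    detect_sequences_alt lower higher = PySem.List.sorted (bFound lower higher) (fun x => x) false := rfl

theorem bFound_nodup (lower higher : Int) : (bFound lower higher).Nodup := by
  unfold bFound
  split
  · apply nodup_foldl_step
    · intro s total hs
      apply nodup_foldl_step
      · intro s d hs
        split
        · exact hs
        · apply nodup_foldl_step
          · intro s block hs
            split
            · exact PySem.Set.nodup_add _ _ hs
            · exact hs
          · exact hs
      · exact hs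
    · exact List.nodup_nil
  · exact List.nodup_nil

theorem bFound_mem (lower higher y : Int) :
    y ∈ bFound lower higher ↔ (max lower 10 ≤ higher ∧
      ∃ total ∈ PySem.List.pyRange 2 (PySem.Str.len (PySem.Int.toStr higher) + 1) 1,
      ∃ d ∈ PySem.List.pyRange 1 total 1, PySem.Int.mod total d = 0 ∧
      ∃ block ∈ PySem.List.pyRange (10 ^ (d - 1).toNat) (10 ^ d.toNat) 1,
        (max lower 10 ≤ numOf total d block ∧ numOf total d block ≤ higher) ∧
        y = numOf total d block) := by
  unfold bFound
  split
  · rename_i hbr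
    rw [mem_foldl_step (fun total y => ∃ d ∈ PySem.List.pyRange 1 total 1,
        PySem.Int.mod total d = 0 ∧
        ∃ block ∈ PySem.List.pyRange (10 ^ (d - 1).toNat) (10 ^ d.toNat) 1,
          (max lower 10 ≤ numOf total d block ∧ numOf total d block ≤ higher) ∧
          y = numOf total d block) _ _ _ ?_ y]
    · simp [hbr]
    · intro s total _ y
      rw [mem_foldl_step (fun d y => PySem.Int.mod total d = 0 ∧
          ∃ block ∈ PySem.List.pyRange (10 ^ (d - 1).toNat) (10 ^ d.toNat) 1,
            (max lower 10 ≤ numOf total d block ∧ numOf total d block ≤ higher) ∧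
            y = numOf total d block) _ _ _ ?_ y]
      intro s d _ y
      split
      · rename_i hm
        simp [hm]
      · rename_i hm
        rw [not_not] at hm
        rw [mem_foldl_step (fun block y =>
            (max lower 10 ≤ numOf total d block ∧ numOf total d block ≤ higher) ∧
            y = numOf total d block) _ _ _ ?_ y]
        · simp [hm]
        · intro s block _ y
          split
          · rename_i hc
            rw [PySem.Set.mem_add]
            simp [hc]
          · rename_i hc
            constructor
            · exact Or.inl
            · rintro (hy | ⟨hC, _⟩)
              · exact hy
              · exact absurd hC hc
  · rename_i hbr
    simp [hbr]
theorem bFound_iff_perN (lower higher y : Int) :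
    y ∈ bFound lower higher ↔ (lower ≤ y ∧ y ≤ higher ∧ PerN y) := by
  rw [bFound_mem]
  constructor
  · rintro ⟨hbr, total, htot, d, hd, hmod, block, hbl, ⟨hge, hle⟩, rfl⟩
    obtain ⟨ht2, htL⟩ := PySem.List.mem_pyRange_one.mp htot
    obtain ⟨hd1, hdt⟩ := PySem.List.mem_pyRange_one.mp hd
    obtain ⟨tN, rfl⟩ : ∃ tN : Nat, total = (tN : Int) := ⟨total.toNat, by omega⟩
    obtain ⟨dN, rfl⟩ : ∃ dN : Nat, d = (dN : Int) := ⟨d.toNat, by omega⟩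
    obtain ⟨hb1, hb2⟩ := PySem.List.mem_pyRange_one.mp hbl
    have hdN1 : 1 ≤ dN := by exact_mod_cast hd1
    have hdNtN : dN < tN := by exact_mod_cast hdt
    have hdvd : dN ∣ tN := by
      rw [PySem.Int.mod_natCast] at hmod
      exact Nat.dvd_of_mod_eq_zero (by exact_mod_cast hmod)
    have hexp : ((dN : Int) - 1).toNat = dN - 1 := by omega
    have he2 : ((dN : Int)).toNat = dN := Int.toNat_natCast dN
    rw [hexp] at hb1
    rw [he2] at hb2
    have hbpos : 0 < block := lt_of_lt_of_le (by positivity) hb1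
    obtain ⟨bN, rfl⟩ : ∃ bN : Nat, block = (bN : Int) := ⟨block.toNat, by omega⟩
    have hbn1 : 10 ^ (dN - 1) ≤ bN := by exact_mod_cast hb1
    have hbn2 : bN < 10 ^ dN := by exact_mod_cast hb2
    have hr1 : 1 ≤ tN / dN := (Nat.one_le_div_iff (by omega)).mpr (by omega)
    have hr2 : 2 ≤ tN / dN := by
      have hq := Nat.div_mul_cancel hdvd
      by_contra hcon
      rcases (by omega : tN / dN = 0 ∨ tN / dN = 1) with h | h <;> rw [h] at hq <;> omega
    have hnum := numOf_eq tN dN bN hr1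
    rw [hnum] at hge hle ⊢
    exact ⟨le_trans (le_max_left _ _) hge, hle, dN, tN / dN, bN, hdN1, hr2, hbn1, hbn2, rfl⟩
  · rintro ⟨hly, hyh, hper⟩
    have h10 : 10 ≤ y := perN_ge10 hper
    have hbr : max lower 10 ≤ higher := le_trans (max_le hly h10) hyh
    obtain ⟨d, r, block, hd, hr, hb1, hb2, rfl⟩ := hper
    set nN := repN block d (r-1) with hnN
    have h10' : (10:Int) ≤ (nN : Int) := h10
    have hlenD : (D nN).length = d * r := repN_len hd (by omega) hb1 hb2
    have hLh : PySem.Str.len (PySem.Int.toStr higher) = ((D higher.toNat).length : Int) := by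
      rw [lenA_eq, toChars_nonneg (by omega)]
    have hmono : (D nN).length ≤ (D higher.toNat).length :=
      D_len_mono (by omega) (by omega)
    have hdr2 : 2 ≤ d * r := le_trans hr (Nat.le_mul_of_pos_left _ (by omega))
    refine ⟨hbr, ((d * r : Nat) : Int), ?_, (d : Int), ?_, ?_, (block : Int), ?_, ?_, ?_⟩
    · rw [PySem.List.mem_pyRange_one, hLh]
      constructor
      · exact_mod_cast hdr2
      · have : d * r ≤ (D higher.toNat).length := by omega
        have := Int.ofNat_le.mpr this
        omega
    · rw [PySem.List.mem_pyRange_one]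
      constructor
      · exact_mod_cast hd
      · have h2d : d * 2 ≤ d * r := Nat.mul_le_mul_left d hr
        have : d < d * r := by omega
        exact_mod_cast this
    · rw [PySem.Int.mod_natCast]
      norm_cast
      exact Nat.mul_mod_right d r
    · rw [PySem.List.mem_pyRange_one]
      have he1 : (((d : Int)) - 1).toNat = d - 1 := by omega
      have he2 : ((d : Int)).toNat = d := Int.toNat_natCast d
      rw [he1, he2]
      constructor
      · exact_mod_cast hb1
      · exact_mod_cast hb2
    · have hnum := numOf_eq (d * r) d block (by
        rw [Nat.mul_div_cancel_left _ (by omega : 0 < d)]; omega)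
      rw [hnum, Nat.mul_div_cancel_left _ (by omega : 0 < d)]
      exact ⟨max_le hly h10, hyh⟩
    · have hnum := numOf_eq (d * r) d block (by
        rw [Nat.mul_div_cancel_left _ (by omega : 0 < d)]; omega)
      rw [hnum, Nat.mul_div_cancel_left _ (by omega : 0 < d)]

theorem A_eq_B (lower higher : Int) :
    detect_sequences lower higher = detect_sequences_alt lower higher := by
  rw [A_eq_filter, B_unfold]
  have hnys : ((PySem.List.pyRange lower (higher+1) 1).filter pA).Nodup :=
    List.Sublist.nodup List.filter_sublist (PySem.List.nodup_pyRange_one _ _)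
  have hperm : ((PySem.List.pyRange lower (higher+1) 1).filter pA).Perm (bFound lower higher) := by
    refine (List.perm_ext_iff_of_nodup hnys (bFound_nodup lower higher)).mpr ?_
    intro a
    rw [List.mem_filter, PySem.List.mem_pyRange_one, bFound_iff_perN, pA_iff]
    constructor
    · rintro ⟨⟨h1, h2⟩, h3⟩
      exact ⟨h1, by omega, h3⟩
    · rintro ⟨h1, h2, h3⟩
      exact ⟨⟨h1, by omega⟩, h3⟩
  have hpair : ((PySem.List.pyRange lower (higher+1) 1).filter pA).Pairwise (· < ·) :=
    List.Pairwise.sublist List.filter_sublist (PySem.List.pairwise_lt_pyRange_one _ _)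
  exact (PySem.List.sorted_eq_of_perm_of_pairwise_lt _ _ _ hperm hpair).symm

-- ===== VERDICT (by name: the statement is the Claim_ definition above) =====
theorem detect_sequences_spec : Claim_equal_detect_sequences := by
  intro lower higher _
  unfold Spec_detect_sequences
  exact A_eq_B lower higher
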